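-- pv_equiv track=rewrite | github.com/tuvimoclang/banggiatuvi | app.py | an_tu_vi
-- ===== SOURCE A (Python) =====
-- def an_tu_vi(ngay, cuc_val):
--     d, c = ngay, cuc_val
--     bu = 0
--     while (d + bu) % c != 0:
--         bu += 1
--     thuong = (d + bu) // c
--     vt = (2 + thuong - 1) % 12
--     if bu % 2 != 0:
--         vt = (vt - bu + 120) % 12
--     else:
--         vt = (vt + bu) % 12
--     return vt
-- ===== SOURCE B (Python) =====
-- def an_tu_vi(ngay, cuc_val):
--     # O(1): the loop in A finds the least bu >= 0 with cuc_val | (ngay + bu),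
--     # which is (-ngay) mod |cuc_val|.
--     bu = (-ngay) % abs(cuc_val)
--     thuong = (ngay + bu) // cuc_val
--     vt = (1 + thuong) % 12
--     if bu % 2:
--         return (vt - bu + 120) % 12
--     return (vt + bu) % 12
-- ===== Notes on version B (the rewrite author's own statement) =====
-- stated objective: faster
-- what changed: Replaces A's increment-until-divisible while loop by the closed form bu = (-ngay) % abs(cuc_val), making the whole function constant time.
import Mathlib
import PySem

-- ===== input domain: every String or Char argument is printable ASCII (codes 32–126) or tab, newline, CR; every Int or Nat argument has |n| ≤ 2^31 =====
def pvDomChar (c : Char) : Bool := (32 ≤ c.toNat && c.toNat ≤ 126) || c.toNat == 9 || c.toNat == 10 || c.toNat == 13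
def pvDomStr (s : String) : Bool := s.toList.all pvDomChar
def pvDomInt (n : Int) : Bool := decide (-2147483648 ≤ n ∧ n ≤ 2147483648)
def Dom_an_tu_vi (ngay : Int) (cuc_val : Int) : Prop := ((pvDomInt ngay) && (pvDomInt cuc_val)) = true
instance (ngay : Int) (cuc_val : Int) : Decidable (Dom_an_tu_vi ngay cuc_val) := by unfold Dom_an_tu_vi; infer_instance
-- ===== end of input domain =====

-- B replaces A's trial-increment while loop by the closed form bu = (-ngay) % abs(cuc_val) (O(1) instead of O(|cuc_val|)).

-- ===== PORT A =====
-- the while loop of A: increment bu while (d+bu) % c != 0; fuel only makes it total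
-- (|c| steps always suffice, proved below), each step is exactly one loop iteration.
def anTuViLoop (d : Int) (c : Int) : Nat → Int → Int
  | 0, bu => bu
  | fuel + 1, bu => if PySem.Int.mod (d + bu) c ≠ 0 then anTuViLoop d c fuel (bu + 1) else bu

def an_tu_vi (ngay : Int) (cuc_val : Int) : Int :=
  let bu := anTuViLoop ngay cuc_val cuc_val.natAbs 0
  let thuong := PySem.Int.floordiv (ngay + bu) cuc_val
  let vt := PySem.Int.mod (2 + thuong - 1) 12
  if PySem.Int.mod bu 2 ≠ 0 then PySem.Int.mod (vt - bu + 120) 12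
  else PySem.Int.mod (vt + bu) 12

-- ===== PORT B =====
def an_tu_vi_alt (ngay : Int) (cuc_val : Int) : Int :=
  let bu := PySem.Int.mod (-ngay) |cuc_val|
  let thuong := PySem.Int.floordiv (ngay + bu) cuc_val
  let vt := PySem.Int.mod (1 + thuong) 12
  if PySem.Int.mod bu 2 ≠ 0 then PySem.Int.mod (vt - bu + 120) 12
  else PySem.Int.mod (vt + bu) 12

-- ===== PRECONDITION & SPEC =====
-- Pre_ excludes exactly cuc_val = 0, where both Pythons raise ZeroDivisionError.
def Pre_an_tu_vi (ngay : Int) (cuc_val : Int) : Prop := cuc_val ≠ 0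
instance (ngay : Int) (cuc_val : Int) : Decidable (Pre_an_tu_vi ngay cuc_val) := by unfold Pre_an_tu_vi; infer_instance
def pvWitness_an_tu_vi : Int × Int := (17, 5)
def Spec_an_tu_vi (ngay : Int) (cuc_val : Int) (out : Int) : Prop := out = an_tu_vi_alt ngay cuc_val
instance (ngay : Int) (cuc_val : Int) (out : Int) : Decidable (Spec_an_tu_vi ngay cuc_val out) := by unfold Spec_an_tu_vi; infer_instance

-- ===== CLAIM (what is proved, stated in full; the proofs are below) =====
def Claim_equal_an_tu_vi : Prop := ∀ (ngay : Int) (cuc_val : Int), Dom_an_tu_vi ngay cuc_val → Pre_an_tu_vi ngay cuc_val → Spec_an_tu_vi ngay cuc_val (an_tu_vi ngay cuc_val)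

-- ===== LEMMAS AND PROOFS =====

-- A's loop, given fuel ≥ k where k = (-(d+bu)) emod |c|, returns bu + k (the least
-- increment making d+bu divisible by c).
theorem anTuViLoop_eq (d c : Int) (hc : c ≠ 0) :
    ∀ (fuel : Nat) (bu k : Int), 0 ≤ k → k ≤ (fuel : Int) →
      (-(d + bu)) % (c.natAbs : Int) = k → anTuViLoop d c fuel bu = bu + k := by
  intro fuel
  induction fuel with
  | zero =>
    intro bu k hk0 hkf hmod
    have hk : k = 0 := by omega
    simpa [anTuViLoop, hk]
  | succ n ih =>
    intro bu k hk0 hkf hmod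
    have hn : (0 : Int) < (c.natAbs : Int) := by
      have := Int.natAbs_pos.mpr hc; exact_mod_cast this
    by_cases hk : k = 0
    · -- divisibility: loop condition is false, return bu
      have hdvd : (c.natAbs : Int) ∣ (-(d + bu)) := by
        rw [Int.dvd_iff_emod_eq_zero]; simpa [hk] using hmod
      have hdvd2 : c ∣ (d + bu) := (Int.dvd_neg).mp (Int.natAbs_dvd.mp hdvd)
      have hzero : PySem.Int.mod (d + bu) c = 0 := (PySem.Int.mod_eq_zero_iff_dvd _ _).mpr hdvd2
      simp [anTuViLoop, hzero, hk]
    · -- loop condition true: step, k decreases by one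
      have hne : PySem.Int.mod (d + bu) c ≠ 0 := by
        intro h0
        have hdvd2 : c ∣ (d + bu) := (PySem.Int.mod_eq_zero_iff_dvd _ _).mp h0
        have hdvd : (c.natAbs : Int) ∣ (-(d + bu)) :=
          Int.natAbs_dvd.mpr (Int.dvd_neg.mpr hdvd2)
        have : (-(d + bu)) % (c.natAbs : Int) = 0 := Int.emod_eq_zero_of_dvd hdvd
        omega
      have hklt : k < (c.natAbs : Int) := hmod ▸ Int.emod_lt_of_pos _ hn
      have hmod' : (-(d + (bu + 1))) % (c.natAbs : Int) = k - 1 := by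
        have e3 : (-(d + bu)) % (c.natAbs : Int) % (c.natAbs : Int)
            = (-(d + bu)) % (c.natAbs : Int) := Int.emod_emod_of_dvd _ dvd_rfl
        have h1 : (-(d + (bu + 1))) % (c.natAbs : Int)
            = ((-(d + bu)) % (c.natAbs : Int) - 1) % (c.natAbs : Int) := by
          rw [show -(d + (bu + 1)) = -(d + bu) - 1 by ring, Int.sub_emod,
            Int.sub_emod ((-(d + bu)) % (c.natAbs : Int)) 1, e3]
        rw [h1, hmod]
        exact Int.emod_eq_of_lt (by omega) (by omega)
      have := ih (bu + 1) (k - 1) (by omega) (by push_cast at hkf ⊢; omega) hmod'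
      rw [show anTuViLoop d c (n + 1) bu = anTuViLoop d c n (bu + 1) by simp [anTuViLoop, hne]]
      rw [this]; ring

theorem an_tu_vi_spec : Claim_equal_an_tu_vi := by
  intro ngay cuc_val _hdom hpre
  have hc : cuc_val ≠ 0 := hpre
  have hn : (0 : Int) < (cuc_val.natAbs : Int) := by
    have := Int.natAbs_pos.mpr hc; exact_mod_cast this
  -- both sides use the same bu
  have habs : |cuc_val| = (cuc_val.natAbs : Int) := by
    simpa using (Int.abs_eq_natAbs cuc_val)
  set k : Int := (-(ngay + 0)) % (cuc_val.natAbs : Int) with hk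
  have hk0 : 0 ≤ k := Int.emod_nonneg _ (by omega)
  have hklt : k < (cuc_val.natAbs : Int) := Int.emod_lt_of_pos _ hn
  have hloop : anTuViLoop ngay cuc_val cuc_val.natAbs 0 = 0 + k :=
    anTuViLoop_eq ngay cuc_val hc cuc_val.natAbs 0 k hk0 (by omega) rfl
  have hbuB : PySem.Int.mod (-ngay) |cuc_val| = k := by
    rw [habs, PySem.Int.mod_eq_emod_of_pos hn]
    simp [hk]
  unfold Spec_an_tu_vi an_tu_vi an_tu_vi_alt
  rw [hloop, hbuB]
  simp only [zero_add]
  rw [show 2 + PySem.Int.floordiv (ngay + k) cuc_val - 1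
      = 1 + PySem.Int.floordiv (ngay + k) cuc_val from by ring]

-- ===== VERDICT (by name: the statement is the Claim_ definition above) =====
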